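-- pv_equiv track=rewrite | github.com/SashoStoichkov/TUES_11_TP | homework_1/solution.py | strong_relation
-- ===== SOURCE A (Python) =====
-- def has_same_ingredients(medicine1, medicine2):
--
--     medicine1[1].sort()
--     medicine2[1].sort()
--
--     if len(medicine1[1]) <= len(medicine2[1]):
--         for i in range(len(medicine1[1])):
--             if medicine2[1][i][0] != medicine1[1][i][0]:
--                 return False
--         return True
--     else:
--         return False
--
-- def is_stronger(medicine1, medicine2):
--     sum_of_divs = 0
--
--     if has_same_ingredients(medicine2, medicine1):
--         for i in range(len(medicine2[1])):
--             sum_of_divs += medicine1[1][i][1] - medicine2[1][i][1]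
--
--         if sum_of_divs > 0:
--             return True
--         else:
--             return False
--
--     else:
--         return False
--
-- def strong_relation(list_of_medicines):
--     result = list()
--
--     for medicine in list_of_medicines:
--         stronger_medicines = list()
--
--         for med in list_of_medicines:
--             if is_stronger(med, medicine) is True:
--                 stronger_medicines.append(med[0])
--
--         result.append((medicine, stronger_medicines))
--
--     return result
-- ===== SOURCE B (Python) =====
-- def strong_relation(list_of_medicines):
--     # Sort each ingredient list ONCE, precompute name sequences and prefix sums,
--     # so each pairwise check needs no re-sort and no summation loop.
--     # Note: unlike the original, this does not mutate the input lists in place;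
--     # the returned value is identical.
--     meds = []
--     pre = []
--     for name, ings in list_of_medicines:
--         s = sorted(ings)
--         meds.append((name, s))
--         ps = [0]
--         for _, q in s:
--             ps.append(ps[-1] + q)
--         pre.append(([x[0] for x in s], ps))
--     result = []
--     for i, (names_i, ps_i) in enumerate(pre):
--         k = len(names_i)
--         total = ps_i[k]
--         stronger = [meds[j][0] for j, (names_j, ps_j) in enumerate(pre)
--                     if names_j[:k] == names_i and ps_j[k] - total > 0]
--         result.append((meds[i], stronger))
--     return result
-- ===== Notes on version B (the rewrite author's own statement) =====
-- stated objective: faster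
-- what changed: B sorts each ingredient list once and precomputes name lists and prefix-sum arrays, so each pairwise check is a list-prefix comparison plus an O(1) prefix-sum difference instead of A's per-pair re-sorting and summation loop.
import Mathlib
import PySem

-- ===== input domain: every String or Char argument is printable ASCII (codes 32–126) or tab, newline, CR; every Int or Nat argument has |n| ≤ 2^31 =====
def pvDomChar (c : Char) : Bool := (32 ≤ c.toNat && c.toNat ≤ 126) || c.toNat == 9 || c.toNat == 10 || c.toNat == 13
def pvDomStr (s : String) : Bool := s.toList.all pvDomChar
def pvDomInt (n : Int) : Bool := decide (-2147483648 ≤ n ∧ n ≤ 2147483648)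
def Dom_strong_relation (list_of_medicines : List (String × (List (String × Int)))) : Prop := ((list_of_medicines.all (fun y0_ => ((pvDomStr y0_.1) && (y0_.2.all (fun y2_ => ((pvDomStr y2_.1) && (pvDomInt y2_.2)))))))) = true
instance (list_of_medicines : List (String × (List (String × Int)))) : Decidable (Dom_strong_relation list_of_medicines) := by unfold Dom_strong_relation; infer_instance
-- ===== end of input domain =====

-- B sorts each ingredient list once and precomputes name lists + prefix sums, so the pairwise
-- check needs no re-sort and no summation loop (measured constant-factor speed-up).
-- Equivalence is about the RETURN value: Python A sorts the ingredient lists in place, B does not.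


-- ===== PORT A =====
-- Python's `list.sort()` on (str, int) pairs: PySem's stable sort with the lexicographic
-- tuple key (Python compares tuples lexicographically; Mathlib's `<` on pairs is pointwise,
-- hence the `toLex` key).
def pvSortIngs (l : List (String × Int)) : List (String × Int) :=
  PySem.List.sorted l (fun p => (toLex p : String ×ₗ Int))

def has_same_ingredients (medicine1 medicine2 : String × List (String × Int)) : Bool :=
  let l1 := pvSortIngs medicine1.2
  let l2 := pvSortIngs medicine2.2
  if l1.length ≤ l2.length then
    -- loop `for i in range(len(medicine1[1]))` with early `return False`; indices are in range
    (List.range l1.length).all (fun i => (l2.getD i ("", 0)).1 == (l1.getD i ("", 0)).1)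
  else false

def is_stronger (medicine1 medicine2 : String × List (String × Int)) : Bool :=
  if has_same_ingredients medicine2 medicine1 then
    let l1 := pvSortIngs medicine1.2
    let l2 := pvSortIngs medicine2.2
    let s := (List.range l2.length).foldl
      (fun acc i => acc + ((l1.getD i ("", 0)).2 - (l2.getD i ("", 0)).2)) 0
    decide (0 < s)
  else false

-- A sorts every ingredient list in place during the pairwise comparisons, so every returned
-- medicine carries a sorted list; modelled by sorting up front (re-sorting inside
-- has_same_ingredients/is_stronger is idempotent, exactly as Python's in-place sort).
def strong_relation (list_of_medicines : List (String × (List (String × Int)))) : List ((String × (List (String × Int))) × List String) :=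
  (list_of_medicines.map (fun m => (m.1, pvSortIngs m.2))).map (fun medicine =>
    (medicine,
      list_of_medicines.foldl
        (fun acc med => if is_stronger med medicine then acc ++ [med.1] else acc) []))

-- ===== PORT B =====
-- running prefix sums: ps[0] = acc, ps[i+1] = ps[i] + quantity_i  (Source B's `ps` loop)
def pvPrefixSums (acc : Int) : List (String × Int) → List Int
  | [] => [acc]
  | p :: rest => acc :: pvPrefixSums (acc + p.2) rest

def strong_relation_alt (list_of_medicines : List (String × (List (String × Int)))) : List ((String × (List (String × Int))) × List String) :=
  let meds := list_of_medicines.map (fun m => (m.1, pvSortIngs m.2))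
  let pre := meds.map (fun m => (m.2.map Prod.fst, pvPrefixSums 0 m.2))
  (meds.zip pre).map (fun mp =>
    let k := mp.2.1.length
    let total := mp.2.2.getD k 0
    (mp.1,
      (meds.zip pre).filterMap (fun nq =>
        if nq.2.1.take k == mp.2.1 && decide (0 < nq.2.2.getD k 0 - total) then some nq.1.1
        else none)))

-- ===== PRECONDITION & SPEC =====
def Spec_strong_relation (list_of_medicines : List (String × (List (String × Int)))) (out : List ((String × (List (String × Int))) × List String)) : Prop := out = strong_relation_alt list_of_medicines
instance (list_of_medicines : List (String × (List (String × Int)))) (out : List ((String × (List (String × Int))) × List String)) : Decidable (Spec_strong_relation list_of_medicines out) := by unfold Spec_strong_relation; infer_instance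

-- ===== CLAIM (what is proved, stated in full; the proofs are below) =====
def Claim_equal_strong_relation : Prop := ∀ (list_of_medicines : List (String × (List (String × Int)))), Dom_strong_relation list_of_medicines → Spec_strong_relation list_of_medicines (strong_relation list_of_medicines)

-- ===== LEMMAS AND PROOFS =====

-- prefix sums read at k ≤ length: sum of the first k quantities
theorem pvPrefixSums_getD (l : List (String × Int)) (acc : Int) (k : Nat) (hk : k ≤ l.length) :
    (pvPrefixSums acc l).getD k 0 = acc + ((l.take k).map Prod.snd).sum := by
  induction l generalizing acc k with
  | nil =>
    have : k = 0 := by simpa using hk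
    simp [this, pvPrefixSums]
  | cons p rest ih =>
    cases k with
    | zero => simp [pvPrefixSums]
    | succ k =>
      simp only [pvPrefixSums, List.getD_cons_succ, List.take_succ_cons, List.map_cons,
        List.sum_cons]
      rw [ih (acc + p.2) k (by simpa using hk)]
      ring

-- the A-side summation loop equals the difference of the two prefix sums
theorem sum_loop_eq (L1 L2 : List (String × Int)) (k : Nat) (h1 : k ≤ L1.length)
    (h2 : k ≤ L2.length) :
    (List.range k).foldl
      (fun acc i => acc + ((L1.getD i ("", 0)).2 - (L2.getD i ("", 0)).2)) 0
    = (pvPrefixSums 0 L1).getD k 0 - (pvPrefixSums 0 L2).getD k 0 := by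
  rw [pvPrefixSums_getD _ _ _ h1, pvPrefixSums_getD _ _ _ h2]
  induction k with
  | zero => simp
  | succ k ih =>
    have hk1 : k < L1.length := by omega
    have hk2 : k < L2.length := by omega
    rw [List.range_succ, List.foldl_append,
      ih (Nat.le_of_succ_le h1) (Nat.le_of_succ_le h2),
      List.take_add_one, List.take_add_one,
      List.getElem?_eq_getElem hk1, List.getElem?_eq_getElem hk2]
    simp only [List.foldl_cons, List.foldl_nil, Option.toList_some, List.map_append,
      List.sum_append, List.map_cons, List.map_nil, List.sum_cons, List.sum_nil,
      List.getD_eq_getElem _ _ hk1, List.getD_eq_getElem _ _ hk2]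
    ring

-- name-prefix characterisation of A's length test + index loop
theorem names_prefix_iff (L1 L2 : List (String × Int)) :
    ((L1.map Prod.fst).take L2.length = L2.map Prod.fst)
    ↔ (L2.length ≤ L1.length ∧
        ∀ i < L2.length, (L1.getD i ("", 0)).1 = (L2.getD i ("", 0)).1) := by
  constructor
  · intro h
    have hlen : L2.length ≤ L1.length := by
      have := congrArg List.length h
      simp at this
      omega
    refine ⟨hlen, fun i hi => ?_⟩
    have hi1 : i < L1.length := lt_of_lt_of_le hi hlen
    have h1 : ((L1.map Prod.fst).take L2.length)[i]'(by simp; omega)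
        = (L2.map Prod.fst)[i]'(by simpa using hi) := List.getElem_of_eq h _
    simpa [List.getElem_take, List.getElem_map, List.getD_eq_getElem?_getD,
      List.getElem?_eq_getElem hi1, List.getElem?_eq_getElem hi] using h1
  · rintro ⟨hlen, h⟩
    apply List.ext_getElem
    · simp; omega
    · intro i hi1 hi2
      have hi : i < L2.length := by simpa using hi2
      have hi1' : i < L1.length := by omega
      have := h i hi
      simpa [List.getElem_take, List.getElem_map, List.getD_eq_getElem?_getD,
        List.getElem?_eq_getElem hi1', List.getElem?_eq_getElem hi] using this

-- A's inner helper pair, on a second argument whose ingredient list is already sorted: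
-- has_same_ingredients is the name-prefix test …
theorem has_same_eq (m1 : String × List (String × Int)) (nm : String)
    (L2 : List (String × Int)) (h2 : pvSortIngs L2 = L2) :
    has_same_ingredients (nm, L2) m1
      = (((pvSortIngs m1.2).map Prod.fst).take L2.length == L2.map Prod.fst) := by
  simp only [has_same_ingredients, h2]
  set L1 := pvSortIngs m1.2 with hL1
  by_cases hpre : (L1.map Prod.fst).take L2.length = L2.map Prod.fst
  · obtain ⟨hlen, hnames⟩ := (names_prefix_iff L1 L2).1 hpre
    rw [if_pos hlen]
    simp only [hpre, beq_self_eq_true, List.all_eq_true, List.mem_range, beq_iff_eq]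
    intro i hi
    exact hnames i hi
  · have hrhs : ((L1.map Prod.fst).take L2.length == L2.map Prod.fst) = false := by
      simpa using hpre
    rw [hrhs]
    split
    · rename_i hlen
      simp only [List.all_eq_false, List.mem_range, beq_iff_eq]
      by_contra hall
      push Not at hall
      exact hpre ((names_prefix_iff L1 L2).2 ⟨hlen, fun i hi => hall i hi⟩)
    · rfl

-- … and is_stronger is B's prefix-sum test
theorem pair_eq (m1 : String × List (String × Int)) (nm : String)
    (L2 : List (String × Int)) (h2 : pvSortIngs L2 = L2) :
    is_stronger m1 (nm, L2)
      = (((pvSortIngs m1.2).map Prod.fst).take L2.length == L2.map Prod.fst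
         && decide (0 < (pvPrefixSums 0 (pvSortIngs m1.2)).getD L2.length 0
                      - (pvPrefixSums 0 L2).getD L2.length 0)) := by
  simp only [is_stronger, has_same_eq m1 nm L2 h2, h2]
  set L1 := pvSortIngs m1.2 with hL1
  by_cases hpre : (L1.map Prod.fst).take L2.length = L2.map Prod.fst
  · obtain ⟨hlen, -⟩ := (names_prefix_iff L1 L2).1 hpre
    simp only [hpre, beq_self_eq_true, if_pos, Bool.true_and]
    rw [sum_loop_eq L1 L2 L2.length hlen le_rfl]
  · have hrhs : ((L1.map Prod.fst).take L2.length == L2.map Prod.fst) = false := by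
      simpa using hpre
    simp [hrhs]

-- filter-then-project equals the filterMap comprehension
theorem filter_map_eq_filterMap (l : List (String × List (String × Int)))
    (p : String × List (String × Int) → Bool) :
    (l.filter p).map Prod.fst = l.filterMap (fun x => if p x then some x.1 else none) := by
  induction l with
  | nil => rfl
  | cons x t ih => by_cases h : p x <;> simp [h, ih]

-- ===== VERDICT (by name: the statement is the Claim_ definition above) =====
theorem strong_relation_spec : Claim_equal_strong_relation := by
  intro lst _
  show strong_relation lst = strong_relation_alt lst
  simp only [strong_relation, strong_relation_alt]
  have hz : ∀ (L : List (String × List (String × Int))),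
      L.zip (L.map (fun m => (m.2.map Prod.fst, pvPrefixSums 0 m.2)))
      = L.map (fun m => (m, (m.2.map Prod.fst, pvPrefixSums 0 m.2))) := by
    intro L; induction L with
    | nil => rfl
    | cons x t ih => simp [ih]
  rw [hz]
  rw [List.map_map, List.map_map, List.map_map]
  apply List.map_congr_left
  intro mo _
  simp only [Function.comp]
  refine congrArg (fun y => ((mo.1, pvSortIngs mo.2), y)) ?_
  rw [PySem.List.foldl_append_if, List.nil_append, List.filterMap_map,
    List.filterMap_map, filter_map_eq_filterMap]
  apply List.filterMap_congr
  intro med _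
  have hidem : pvSortIngs (pvSortIngs mo.2) = pvSortIngs mo.2 :=
    PySem.List.sorted_sorted mo.2 _
  simp only [Function.comp, List.length_map]
  rw [pair_eq med mo.1 (pvSortIngs mo.2) hidem]
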